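-- pv_equiv track=rewrite | github.com/tabi-code/AtCoder | Lib/registed/alg_duplicate_combination_mod.py | duplicate_combination_mod
-- ===== SOURCE A (Python) =====
-- def duplicate_combination_mod(n, r, mod):
--     n = n + r - 1
--     r = min(n - r, r)
--     if r == 0:
--         return 1
--     else:
--         denominator = 1
--         for i in range(n, n - r, -1):
--             denominator = (denominator * i) % mod
--         molecule = 1
--         for i in range(1, r + 1):
--             molecule = (molecule * i) % mod
--         return denominator * pow(molecule, mod - 2, mod) % mod
-- ===== SOURCE B (Python) =====
-- def duplicate_combination_mod(n, r, mod):
--     m = n + r - 1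
--     k = min(m - r, r)
--     res = 1
--     i = k
--     while i > 0:
--         res = res * (m - k + i) % mod * pow(i, mod - 2, mod) % mod
--         i -= 1
--     return res
-- ===== Notes on version B (the rewrite author's own statement) =====
-- stated objective: alternative
-- what changed: B replaces A's two forward product loops plus one final factorial inverse pow(r!, mod-2, mod) by a single descending while-loop counting i from r down to 1, maintaining one running value that absorbs each numerator factor (n-r+i) together with the per-term inverse pow(i, mod-2, mod).
-- outside the precondition, e.g. on duplicate_combination_mod(3, 2, 1): A returns 0, B returns 0; on duplicate_combination_mod(-6, 18, -25): A returns -24, B returns 1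
import Mathlib
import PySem

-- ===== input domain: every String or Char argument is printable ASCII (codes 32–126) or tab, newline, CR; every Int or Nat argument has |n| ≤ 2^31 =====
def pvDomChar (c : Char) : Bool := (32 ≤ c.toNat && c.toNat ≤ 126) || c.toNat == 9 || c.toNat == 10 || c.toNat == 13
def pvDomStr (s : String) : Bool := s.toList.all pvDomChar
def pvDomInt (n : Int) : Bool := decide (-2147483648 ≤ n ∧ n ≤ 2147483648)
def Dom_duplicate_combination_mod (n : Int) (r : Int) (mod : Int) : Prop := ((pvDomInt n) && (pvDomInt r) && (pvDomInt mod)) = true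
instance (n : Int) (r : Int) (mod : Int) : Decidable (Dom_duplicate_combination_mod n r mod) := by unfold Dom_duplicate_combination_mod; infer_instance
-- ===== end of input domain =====

-- B replaces A's two forward product loops plus one final factorial inverse by a single descending
-- countdown loop maintaining one running value with per-term inverses (alternative decomposition, same cost class).
-- ===== PORT A =====
-- Python's three-argument pow, ported by hand as binary exponentiation (as CPython computes it); exact for a
-- nonnegative exponent and positive modulus: pvPowMod b e m = b^e % m (proved in pvPowMod_eq below).
-- Both ports call pow; exponent mod-2 is taken as (mod-2).toNat, exact for mod >= 2 (Pre_);
-- Python's negative-exponent pow (mod < 2) is outside Pre_.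
def pvPowMod (b : Int) (e : Nat) (m : Int) : Int :=
  if e = 0 then PySem.Int.mod 1 m
  else
    let h := pvPowMod (PySem.Int.mod (b * b) m) (e / 2) m
    if e % 2 = 1 then PySem.Int.mod (h * b) m else h
termination_by e
decreasing_by exact Nat.div_lt_self (Nat.pos_of_ne_zero (by assumption)) one_lt_two

def duplicate_combination_mod (n : Int) (r : Int) (mod : Int) : Int :=
  let n2 := n + r - 1
  let r2 := min (n2 - r) r
  if r2 = 0 then 1
  else
    let denominator := (PySem.List.pyRange n2 (n2 - r2) (-1)).foldl (fun d i => PySem.Int.mod (d * i) mod) 1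
    let molecule := (PySem.List.pyRange 1 (r2 + 1) 1).foldl (fun m i => PySem.Int.mod (m * i) mod) 1
    PySem.Int.mod (denominator * pvPowMod molecule (mod - 2).toNat mod) mod

-- ===== PORT B =====
-- the 'while i > 0' countdown of Source B, as recursion on the counter i
def pvCountdown (m : Int) (k : Int) (mod : Int) (res : Int) (i : Int) : Int :=
  if h : 0 < i then
    pvCountdown m k mod
      (PySem.Int.mod (PySem.Int.mod (res * (m - k + i)) mod * pvPowMod i (mod - 2).toNat mod) mod)
      (i - 1)
  else res
termination_by i.toNat
decreasing_by omega

def duplicate_combination_mod_alt (n : Int) (r : Int) (mod : Int) : Int :=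
  let m := n + r - 1
  let k := min (m - r) r
  pvCountdown m k mod 1 k

-- ===== PRECONDITION & SPEC =====
-- Pre_ excludes mod < 2 when the effective r = min(n-1, r) is nonzero: there pow's exponent mod-2 is negative, so Python
-- uses modular-inverse semantics (mod = 0 raises ZeroDivisionError, non-invertible factorials raise ValueError, and the
-- sign-of-modulus corner values are rendered differently by A's whole-factorial inverse and B's per-term inverses).
def Pre_duplicate_combination_mod (n : Int) (r : Int) (mod : Int) : Prop :=
  2 ≤ mod ∨ min (n - 1) r = 0
instance (n : Int) (r : Int) (mod : Int) : Decidable (Pre_duplicate_combination_mod n r mod) := by unfold Pre_duplicate_combination_mod; infer_instance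
def pvWitness_duplicate_combination_mod : Int × Int × Int := (4, 2, 7)
def Spec_duplicate_combination_mod (n : Int) (r : Int) (mod : Int) (out : Int) : Prop := out = duplicate_combination_mod_alt n r mod
instance (n : Int) (r : Int) (mod : Int) (out : Int) : Decidable (Spec_duplicate_combination_mod n r mod out) := by unfold Spec_duplicate_combination_mod; infer_instance

-- ===== CLAIM (what is proved, stated in full; the proofs are below) =====
def Claim_equal_duplicate_combination_mod : Prop := ∀ (n : Int) (r : Int) (mod : Int), Dom_duplicate_combination_mod n r mod → Pre_duplicate_combination_mod n r mod → Spec_duplicate_combination_mod n r mod (duplicate_combination_mod n r mod)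

-- ===== LEMMAS AND PROOFS =====

-- A's product loops: folding (d*i) % m over a list, started at d % m, is (d * prod) % m.
theorem pv_foldl_mulmod (m : Int) (hm : 0 < m) (l : List Int) (d : Int) :
    l.foldl (fun d i => PySem.Int.mod (d * i) m) (d % m) = (d * l.prod) % m := by
  induction l generalizing d with
  | nil => simp
  | cons x xs ih =>
    simp only [List.foldl_cons, List.prod_cons]
    rw [PySem.Int.mod_eq_emod_of_pos hm]
    have h1 : ((d % m) * x) % m = (d * x) % m := by
      conv_rhs => rw [Int.mul_emod]
      rw [Int.mul_emod, Int.emod_emod_of_dvd _ dvd_rfl]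
    rw [h1, ih (d * x), mul_assoc]

-- (b % m)^e % m = b^e % m
theorem pv_pow_mod (b m : Int) (e : Nat) : (b % m) ^ e % m = b ^ e % m := by
  induction e with
  | zero => simp
  | succ k ih =>
    rw [pow_succ, pow_succ, Int.mul_emod, ih, Int.emod_emod_of_dvd _ dvd_rfl, ← Int.mul_emod]

-- pvPowMod computes b^e % m for a positive modulus
theorem pvPowMod_eq (b : Int) (e : Nat) (m : Int) (hm : 0 < m) : pvPowMod b e m = b ^ e % m := by
  induction e using Nat.strong_induction_on generalizing b with
  | _ e ih =>
    rw [pvPowMod]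
    by_cases h0 : e = 0
    · simp [h0, PySem.Int.mod_eq_emod_of_pos hm]
    · simp only [if_neg h0]
      have h2 : e / 2 < e := Nat.div_lt_self (Nat.pos_of_ne_zero h0) one_lt_two
      rw [ih _ h2]
      simp only [PySem.Int.mod_eq_emod_of_pos hm]
      rw [pv_pow_mod]
      by_cases hpar : e % 2 = 1
      · have he : 2 * (e / 2) + 1 = e := by omega
        simp only [if_pos hpar]
        rw [Int.mul_emod, Int.emod_emod_of_dvd _ dvd_rfl, ← Int.mul_emod,
            ← pow_two, ← pow_mul, ← pow_succ, he]
      · have he : 2 * (e / 2) = e := by omega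
        simp only [if_neg hpar]
        rw [← pow_two, ← pow_mul, he]

-- B's countdown loop accumulates, modulo m, res times the product of (c + j) * j^e over j = 1..t.
theorem pvCountdown_spec (c k m : Int) (hm : 0 < m) (t : Nat) (res : Int) :
    pvCountdown c k m (res % m) (t : Int)
      = (res * ((List.range t).map (fun j : Nat => (c - k + ((j : Int) + 1)) * ((j : Int) + 1) ^ (m - 2).toNat)).prod) % m := by
  induction t generalizing res with
  | zero => rw [pvCountdown]; simp
  | succ s ih =>
    rw [pvCountdown]
    have hpos : (0 : Int) < ((s : Nat) + 1 : Nat) := by positivity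
    rw [dif_pos (by exact_mod_cast hpos)]
    have hstep : PySem.Int.mod (PySem.Int.mod ((res % m) * (c - k + ((s : Nat) + 1 : Nat))) m
        * pvPowMod ((s : Nat) + 1 : Nat) (m - 2).toNat m) m
        = (res * ((c - k + ((s : Int) + 1)) * ((s : Int) + 1) ^ (m - 2).toNat)) % m := by
      rw [pvPowMod_eq _ _ _ hm]
      simp only [PySem.Int.mod_eq_emod_of_pos hm]
      push_cast
      conv_rhs => rw [show res * ((c - k + ((s : Int) + 1)) * ((s : Int) + 1) ^ (m - 2).toNat)
        = (res * (c - k + ((s : Int) + 1))) * ((s : Int) + 1) ^ (m - 2).toNat by ring, Int.mul_emod]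
      rw [Int.mul_emod res, Int.mul_emod (res % m), Int.emod_emod_of_dvd _ dvd_rfl]
    have hcast : ((s : Nat) + 1 : Nat) - (1 : Int) = ((s : Nat) : Int) := by push_cast; ring
    rw [show ((((s : Nat) + 1 : Nat) : Int) - 1) = ((s : Nat) : Int) by push_cast; ring]
    have := ih (res * ((c - k + ((s : Int) + 1)) * ((s : Int) + 1) ^ (m - 2).toNat))
    rw [← hstep] at this
    rw [this, List.range_succ, List.map_append, List.prod_append]
    simp only [List.map_cons, List.map_nil, List.prod_cons, List.prod_nil]
    congr 1
    ring

theorem pv_one_mod (m : Int) (hm : 2 ≤ m) : (1 : Int) % m = 1 :=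
  Int.emod_eq_of_lt (by norm_num) (by omega)

theorem pv_foldl_mulmod_one (m : Int) (hm : 2 ≤ m) (l : List Int) :
    l.foldl (fun d i => PySem.Int.mod (d * i) m) 1 = l.prod % m := by
  have h := pv_foldl_mulmod m (by omega) l 1
  rw [pv_one_mod m hm] at h
  simpa using h

theorem pv_prod_map_pow (l : List Int) (e : Nat) : (l.map (fun x => x ^ e)).prod = l.prod ^ e := by
  induction l with
  | nil => simp
  | cons x xs ih => simp [ih, mul_pow]

-- ===== VERDICT (by name: the statement is the Claim_ definition above) =====
theorem duplicate_combination_mod_spec : Claim_equal_duplicate_combination_mod := by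
  intro n r mod _ hpre
  unfold Spec_duplicate_combination_mod duplicate_combination_mod duplicate_combination_mod_alt
  simp only []
  set n2 := n + r - 1 with hn2
  set r2 := min (n2 - r) r with hr2
  by_cases h0 : r2 = 0
  · rw [if_pos h0, h0, pvCountdown]; simp
  · have hm : 2 ≤ mod := by
      rcases hpre with h | h
      · exact h
      · exfalso; apply h0; omega
    have hmpos : (0 : Int) < mod := by omega
    rw [if_neg h0]
    by_cases hneg : r2 < 0
    · -- empty products on both sides: both values are 1
      rw [PySem.List.pyRange_neg_one_eq_nil (by omega), PySem.List.pyRange_one_eq_nil (by omega)]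
      simp only [List.foldl_nil]
      rw [pvCountdown, dif_neg (by omega), pvPowMod_eq _ _ _ hmpos]
      simp [PySem.Int.mod_eq_emod_of_pos hmpos, pv_one_mod mod hm]
    · have hr2pos : 0 < r2 := by omega
      -- B's side via the countdown lemma at t = r2.toNat
      have ht : ((r2.toNat : Nat) : Int) = r2 := Int.toNat_of_nonneg (by omega)
      have hB := pvCountdown_spec n2 r2 mod hmpos r2.toNat 1
      rw [pv_one_mod mod hm, ht, one_mul] at hB
      rw [hB]
      -- A's side: two fold-products and a final power
      rw [pv_foldl_mulmod_one mod hm, pv_foldl_mulmod_one mod hm]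
      rw [pvPowMod_eq _ _ _ hmpos, pv_pow_mod]
      simp only [PySem.Int.mod_eq_emod_of_pos hmpos]
      rw [← Int.mul_emod]
      -- identify the two products
      have hL1 : (PySem.List.pyRange n2 (n2 - r2) (-1)).prod
          = ((List.range r2.toNat).map (fun j : Nat => n2 - r2 + ((j : Int) + 1))).prod := by
        rw [PySem.List.pyRange_neg_one_eq_reverse, List.prod_reverse,
            PySem.List.pyRange_one]
        rw [show (n2 + 1 - (n2 - r2 + 1)).toNat = r2.toNat by omega]
        exact congrArg List.prod (List.map_congr_left (fun j _ => by ring))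
      have hL2 : (PySem.List.pyRange 1 (r2 + 1) 1).prod
          = ((List.range r2.toNat).map (fun j : Nat => ((j : Int) + 1))).prod := by
        rw [PySem.List.pyRange_one]
        rw [show (r2 + 1 - 1).toNat = r2.toNat by omega]
        exact congrArg List.prod (List.map_congr_left (fun j _ => by ring))
      rw [hL1, hL2, ← pv_prod_map_pow, List.map_map, ← List.prod_map_mul]
      exact congrArg (· % mod) (congrArg List.prod (List.map_congr_left (fun j _ => by
        simp only [Function.comp_apply])))
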